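-- pv_equiv track=rewrite | github.com/Burnberry/AdventOfCode | 2015/day8.py | count_mem
-- ===== SOURCE A (Python) =====
-- def count_mem(line):
--     n = 0
--     hexa = "0123456789abcdef"
--     line = line[1:-1]
--     while line:
--         n += 1
--         if line[0] != '\\':
--             line = line[1:]
--         elif line[:2] == '\\x' and len(line[2:4]) == 2 and line[2] in hexa and line[3] in hexa:
--             line = line[4:]
--         else:
--             line = line[2:]
--     return n
-- ===== SOURCE B (Python) =====
-- def count_mem(line):
--     # Single index pointer over the original string; no repeated slicing.
--     hexa = set("0123456789abcdef")
--     m = len(line) - 1   # exclusive end: the closing quote position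
--     i = 1               # skip the opening quote
--     n = 0
--     while i < m:
--         n += 1
--         if line[i] != '\\':
--             i += 1
--         elif i + 3 < m and line[i+1] == 'x' and line[i+2] in hexa and line[i+3] in hexa:
--             i += 4
--         else:
--             i += 2
--     return n
-- ===== Notes on version B (the rewrite author's own statement) =====
-- stated objective: faster
-- what changed: B scans the string once with an index pointer advanced by 1/2/4 instead of re-slicing the remaining string on every step.
import Mathlib
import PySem

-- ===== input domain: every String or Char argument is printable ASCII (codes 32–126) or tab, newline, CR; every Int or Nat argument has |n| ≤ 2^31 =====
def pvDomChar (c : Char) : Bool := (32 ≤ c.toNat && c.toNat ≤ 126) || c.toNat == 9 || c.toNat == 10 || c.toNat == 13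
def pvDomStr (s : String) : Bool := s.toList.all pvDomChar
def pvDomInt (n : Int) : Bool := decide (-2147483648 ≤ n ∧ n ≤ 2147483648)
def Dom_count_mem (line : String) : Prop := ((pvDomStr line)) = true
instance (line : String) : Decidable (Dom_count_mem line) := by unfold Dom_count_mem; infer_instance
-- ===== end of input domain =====

-- B replaces A's repeated slicing of the remaining string by a single index pointer
-- over the original string (A re-slices on every step); return values proved equal.

-- c in "0123456789abcdef"
def pvIsHex (c : Char) : Bool := "0123456789abcdef".toList.contains c

-- ===== PORT A =====
-- A's while loop over the shrinking string `line`, one recursive step per iteration;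
-- the Nat fuel only makes the recursion structural: each iteration consumes at least
-- one character, so the initial fuel (the trimmed string's length) never runs out.
-- `line[4:]` of the matched `c :: rest` is `rest.drop 3`, `line[2:]` is `rest.drop 1`.
-- `line[2] in hexa` / `line[3] in hexa` are evaluated only after the preceding length
-- check succeeds (Python `and` short-circuits), so `l[j]?.any pvIsHex` is exact here.
def pvALoop : Nat → List Char → Int → Int
  | 0, _, n => n
  | _ + 1, [], n => n
  | k + 1, c :: rest, n =>
    if c ≠ '\\' then pvALoop k rest (n + 1)
    else if (c :: rest).take 2 = ['\\', 'x'] ∧ (((c :: rest).drop 2).take 2).length = 2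
            ∧ (c :: rest)[2]?.any pvIsHex = true ∧ (c :: rest)[3]?.any pvIsHex = true then
      pvALoop k (rest.drop 3) (n + 1)
    else
      pvALoop k (rest.drop 1) (n + 1)

def count_mem (line : String) : Int :=
  pvALoop (PySem.List.slice line.toList (some 1) (some (-1))).length
    (PySem.List.slice line.toList (some 1) (some (-1))) 0

-- ===== PORT B =====
-- B's while loop: index i over the original characters, exclusive end m = len - 1;
-- the Nat fuel only makes the recursion structural: i advances by at least 1 per
-- iteration, so the initial fuel m - 1 (iterations from i = 1) never runs out.
def pvBLoop : Nat → List Char → Nat → Nat → Int → Int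
  | 0, _, _, _, n => n
  | k + 1, s, m, i, n =>
    if i < m then
      if s[i]? ≠ some '\\' then pvBLoop k s m (i + 1) (n + 1)
      else if i + 3 < m ∧ s[i + 1]? = some 'x'
              ∧ s[i + 2]?.any pvIsHex = true ∧ s[i + 3]?.any pvIsHex = true then
        pvBLoop k s m (i + 4) (n + 1)
      else
        pvBLoop k s m (i + 2) (n + 1)
    else n

-- m = len(line) - 1 : Python's -1 for the empty string and Nat's 0 both fail `1 < m`.
def count_mem_alt (line : String) : Int :=
  pvBLoop (line.toList.length - 1 - 1) line.toList (line.toList.length - 1) 1 0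

-- ===== PRECONDITION & SPEC =====
def Spec_count_mem (line : String) (out : Int) : Prop := out = count_mem_alt line
instance (line : String) (out : Int) : Decidable (Spec_count_mem line out) := by unfold Spec_count_mem; infer_instance

-- ===== CLAIM (what is proved, stated in full; the proofs are below) =====
def Claim_equal_count_mem : Prop := ∀ (line : String), Dom_count_mem line → Spec_count_mem line (count_mem line)

-- ===== LEMMAS AND PROOFS =====

lemma pv_take2_pair (l : List Char) (a b : Char) :
    l.take 2 = [a, b] ↔ l[0]? = some a ∧ l[1]? = some b := by
  match l with
  | [] => simp
  | [x] => simp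
  | x :: y :: t => simp [List.take]

lemma pv_len_dt (l : List Char) : (((l.drop 2).take 2).length = 2) ↔ 4 ≤ l.length := by
  simp [List.length_take, List.length_drop]; omega

-- A's  line[1:-1]  as drop/take
lemma pv_slice_trim (xs : List Char) :
    PySem.List.slice xs (some 1) (some (-1)) = (xs.drop 1).take (xs.length - 2) := by
  cases xs with
  | nil => rfl
  | cons a l =>
    have h1 : PySem.List.clampIdx (a :: l).length 1 = 1 := by
      rw [show (1:Int) = ((1:Nat):Int) from rfl, PySem.List.clampIdx_natCast]
      simp
    simp only [PySem.List.slice, PySem.List.clampIdx_neg_one, h1, Nat.sub_sub]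

-- the A-side list after consuming j more characters, on the original string
lemma pv_seg_drop (s : List Char) (m i j : Nat) :
    ((s.drop i).take (m - i)).drop j = (s.drop (i + j)).take (m - (i + j)) := by
  rw [List.drop_take, List.drop_drop]
  congr 1
  omega

lemma pv_seg_get (s : List Char) (m i j : Nat) (hj : i + j < m) :
    ((s.drop i).take (m - i))[j]? = s[i + j]? := by
  rw [List.getElem?_take_of_lt (by omega), List.getElem?_drop]

-- the loop invariant: A's remaining string is s[i:m], both loops step in lockstep
lemma pv_loop_eq (k : Nat) : ∀ (s : List Char) (m : Nat), m ≤ s.length →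
    ∀ i n, m - i ≤ k → pvALoop k ((s.drop i).take (m - i)) n = pvBLoop k s m i n := by
  induction k with
  | zero => intro s m _ i n _; rfl
  | succ k ih =>
    intro s m hm i n hk
    by_cases hi : i < m
    · have hd : (s.drop i).take (m - i) = s[i] :: ((s.drop (i+1)).take (m - (i+1))) := by
        rw [show m - i = (m - (i+1)) + 1 from by omega,
            List.drop_eq_getElem_cons (show i < s.length from by omega), List.take_succ_cons]
      have hgi : s[i]? = some s[i] := List.getElem?_eq_getElem (by omega)
      have hlen' : ((s.drop (i+1)).take (m - (i+1))).length = m - (i+1) := by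
        simp [List.length_take, List.length_drop]; omega
      rw [hd, pvALoop, pvBLoop, if_pos hi]
      by_cases hc : s[i] = '\\'
      · have hcond : ((s[i] :: ((s.drop (i+1)).take (m - (i+1)))).take 2 = ['\\', 'x']
              ∧ (((s[i] :: ((s.drop (i+1)).take (m - (i+1)))).drop 2).take 2).length = 2
              ∧ (s[i] :: ((s.drop (i+1)).take (m - (i+1))))[2]?.any pvIsHex = true
              ∧ (s[i] :: ((s.drop (i+1)).take (m - (i+1))))[3]?.any pvIsHex = true)
            ↔ (i + 3 < m ∧ s[i + 1]? = some 'x'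
              ∧ s[i + 2]?.any pvIsHex = true ∧ s[i + 3]?.any pvIsHex = true) := by
          constructor
          · rintro ⟨h1, h2, h3, h4⟩
            have h4le : 4 ≤ (s[i] :: ((s.drop (i+1)).take (m - (i+1)))).length :=
              (pv_len_dt _).mp h2
            have hm4 : i + 3 < m := by simp [hlen'] at h4le; omega
            have hx := (pv_take2_pair _ '\\' 'x').mp h1
            refine ⟨hm4, ?_, ?_, ?_⟩
            · have := hx.2
              simp only [List.getElem?_cons_succ] at this
              rw [pv_seg_get s m (i+1) 0 (by omega)] at this
              simpa using this
            · simp only [show ((2:Nat) = 1 + 1) from rfl, List.getElem?_cons_succ] at h3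
              rw [pv_seg_get s m (i+1) 1 (by omega)] at h3
              simpa using h3
            · simp only [show ((3:Nat) = 2 + 1) from rfl, List.getElem?_cons_succ] at h4
              rw [pv_seg_get s m (i+1) 2 (by omega)] at h4
              simpa using h4
          · rintro ⟨hm4, hx, h3, h4⟩
            refine ⟨?_, ?_, ?_, ?_⟩
            · refine (pv_take2_pair _ '\\' 'x').mpr ⟨by simp [hc], ?_⟩
              simp only [List.getElem?_cons_succ]
              rw [pv_seg_get s m (i+1) 0 (by omega)]
              simpa using hx
            · refine (pv_len_dt _).mpr ?_
              simp [hlen']; omega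
            · simp only [show ((2:Nat) = 1 + 1) from rfl, List.getElem?_cons_succ]
              rw [pv_seg_get s m (i+1) 1 (by omega)]
              simpa using h3
            · simp only [show ((3:Nat) = 2 + 1) from rfl, List.getElem?_cons_succ]
              rw [pv_seg_get s m (i+1) 2 (by omega)]
              simpa using h4
        rw [if_neg (show ¬ (s[i] ≠ '\\') from by simp [hc]),
            if_neg (show ¬ (s[i]? ≠ some '\\') from by simp [hgi, hc])]
        by_cases hB : i + 3 < m ∧ s[i + 1]? = some 'x'
            ∧ s[i + 2]?.any pvIsHex = true ∧ s[i + 3]?.any pvIsHex = true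
        · rw [if_pos hB, if_pos (hcond.mpr hB), pv_seg_drop s m (i+1) 3]
          rw [show i + 1 + 3 = i + 4 from by omega]
          exact ih s m hm (i+4) (n+1) (by omega)
        · rw [if_neg hB, if_neg (fun hA => hB (hcond.mp hA)), pv_seg_drop s m (i+1) 1]
          rw [show i + 1 + 1 = i + 2 from by omega]
          exact ih s m hm (i+2) (n+1) (by omega)
      · rw [if_pos hc, if_pos (show s[i]? ≠ some '\\' from by simp [hgi, hc])]
        exact ih s m hm (i+1) (n+1) (by omega)
    · have h0 : m - i = 0 := by omega
      rw [h0]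
      simp only [List.take_zero, pvALoop, pvBLoop, if_neg hi]

-- ===== VERDICT (by name: the statement is the Claim_ definition above) =====
theorem count_mem_spec : Claim_equal_count_mem := by
  intro line _
  unfold Spec_count_mem count_mem count_mem_alt
  rw [pv_slice_trim]
  rw [show line.toList.length - 2 = line.toList.length - 1 - 1 from by omega]
  rw [show ((line.toList.drop 1).take (line.toList.length - 1 - 1)).length
      = line.toList.length - 1 - 1 from by simp [List.length_take]]
  exact pv_loop_eq _ line.toList (line.toList.length - 1) (by omega) 1 0 (by omega)
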